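-- pv_equiv track=rewrite | github.com/ZepScope/ZepScope-Code | Checker/falcon/detectors/zep_checker/utils.py | deleteCanNameStr
-- ===== SOURCE A (Python) =====
-- def deleteCanNameStr(req_str):
--     if 'ERROR_MSG' in req_str:
--         return req_str
--     if req_str=='Strings.toHexString(uint256,uint256).value':
--         return req_str
--     if '@' in req_str:
--         eles=req_str.split('@')
--         new_req_str=''
--         for ele in eles:
--             new_ele=deleteCanNameStr(ele)
--             new_req_str+=new_ele
--             new_req_str+='@'
--         new_req_str=new_req_str[:-1]
--         return new_req_str
--     if '.' in req_str:
--         req_str= req_str.split('.')[-1]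
--         if '#' in req_str:
--             req_str=req_str.split('#')[0]
--         return req_str
--     return req_str
-- ===== SOURCE B (Python) =====
-- _SPECIAL = 'Strings.toHexString(uint256,uint256).value'
--
-- def deleteCanNameStr(req_str):
--     # Single left-to-right character scan (state machine); no splitting, no recursion.
--     # Per '@'-piece state: raw = the piece's chars, buf = chars after the last '.'
--     # and before the first subsequent '#', seen_dot / hash_seen flags.
--     if 'ERROR_MSG' in req_str:
--         return req_str
--     out = []
--     raw = []
--     buf = []
--     seen_dot = False
--     hash_seen = False
--     for ch in req_str:
--         if ch == '@':
--             out.append(''.join(raw) if (''.join(raw) == _SPECIAL or not seen_dot) else ''.join(buf))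
--             raw, buf, seen_dot, hash_seen = [], [], False, False
--         else:
--             raw.append(ch)
--             if ch == '.':
--                 buf, seen_dot, hash_seen = [], True, False
--             elif ch == '#':
--                 hash_seen = True
--             elif not hash_seen:
--                 buf.append(ch)
--     out.append(''.join(raw) if (''.join(raw) == _SPECIAL or not seen_dot) else ''.join(buf))
--     return '@'.join(out)
-- ===== Notes on version B (the rewrite author's own statement) =====
-- stated objective: alternative
-- what changed: Replaces A's recursion through the separator split plus per-piece dot/hash split passes with a single left-to-right character scan: a state machine that maintains, per separator-delimited piece, the raw characters, the characters after the last dot and before the next hash, and two flags, emitting each piece at separator boundaries; the per-piece ERROR-message check is subsumed by the top-level one.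
import Mathlib
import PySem

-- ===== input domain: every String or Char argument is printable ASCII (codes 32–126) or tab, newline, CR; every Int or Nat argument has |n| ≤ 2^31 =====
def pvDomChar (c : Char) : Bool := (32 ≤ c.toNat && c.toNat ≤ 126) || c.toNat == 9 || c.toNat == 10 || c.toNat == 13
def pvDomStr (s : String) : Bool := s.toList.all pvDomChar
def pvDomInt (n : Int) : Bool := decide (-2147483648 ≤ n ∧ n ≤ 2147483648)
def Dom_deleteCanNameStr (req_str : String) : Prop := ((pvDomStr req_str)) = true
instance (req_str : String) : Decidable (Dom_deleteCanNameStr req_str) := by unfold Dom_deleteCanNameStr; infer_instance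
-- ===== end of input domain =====

-- B replaces A's recursion through the separator split and the per-piece dot/hash split passes
-- by a single left-to-right character scan (state machine) that emits pieces at separator boundaries.

-- ===== PORT A =====
-- Helper lemmas needed by the port's termination proof (the recursive call is on a piece of
-- req_str.split('@'), which is strictly shorter when '@' occurs in req_str).

-- PySem.Chars.splitOn with a one-character separator is List.splitOn of that character.
theorem charsSplitOn_go_singleton (c : Char) :
    ∀ (fuel : Nat) (l cur : List Char) (acc : List (List Char)), l.length ≤ fuel →
      PySem.Chars.splitOn.go [c] fuel l cur acc =
        acc.reverse ++ List.modifyHead (fun t => cur.reverse ++ t) (l.splitOn c) := by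
  intro fuel
  induction fuel with
  | zero =>
    intro l cur acc hl
    have : l = [] := List.eq_nil_of_length_eq_zero (Nat.le_zero.mp hl)
    subst this
    simp [PySem.Chars.splitOn.go, List.splitOn, List.splitOnP_nil]
  | succ fuel ih =>
    intro l cur acc hl
    cases l with
    | nil => simp [PySem.Chars.splitOn.go, List.splitOn, List.splitOnP_nil]
    | cons ch rest =>
      by_cases hc : ch = c
      · subst hc
        rw [PySem.Chars.splitOn.go]
        have hpre : [ch].isPrefixOf (ch :: rest) = true := by
          simp [List.isPrefixOf]
        rw [if_pos hpre]
        have hrest : List.drop [ch].length (ch :: rest) = rest := by simp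
        rw [hrest, ih rest [] (cur.reverse :: acc) (by simpa using Nat.le_of_succ_le_succ hl)]
        have hsp : (ch :: rest).splitOn ch = [] :: rest.splitOn ch := by
          simp [List.splitOn, List.splitOnP_cons]
        rw [hsp]
        obtain ⟨h0, t0, hht⟩ : ∃ h0 t0, rest.splitOn ch = h0 :: t0 := by
          cases e : rest.splitOn ch with
          | nil => exact absurd e (List.splitOnP_ne_nil _ _)
          | cons a b => exact ⟨a, b, rfl⟩
        rw [hht]
        simp
      · rw [PySem.Chars.splitOn.go]
        have hpre : ([c].isPrefixOf (ch :: rest)) = false := by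
          simp [List.isPrefixOf]
          intro hcc
          exact absurd hcc.symm hc
        rw [if_neg (by simp [hpre])]
        rw [ih rest (ch :: cur) acc (by simpa using Nat.le_of_succ_le_succ hl)]
        have hsp : (ch :: rest).splitOn c = List.modifyHead (List.cons ch) (rest.splitOn c) := by
          simp [List.splitOn, List.splitOnP_cons, hc]
        rw [hsp]
        obtain ⟨h0, t0, hht⟩ : ∃ h0 t0, rest.splitOn c = h0 :: t0 := by
          cases e : rest.splitOn c with
          | nil => exact absurd e (List.splitOnP_ne_nil _ _)
          | cons a b => exact ⟨a, b, rfl⟩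
        rw [hht]
        simp

theorem charsSplitOn_singleton (c : Char) (s : List Char) :
    PySem.Chars.splitOn s [c] = s.splitOn c := by
  obtain ⟨h0, t0, hht⟩ : ∃ h0 t0, s.splitOn c = h0 :: t0 := by
    cases e : s.splitOn c with
    | nil => exact absurd e (List.splitOnP_ne_nil _ _)
    | cons a b => exact ⟨a, b, rfl⟩
  unfold PySem.Chars.splitOn
  rw [charsSplitOn_go_singleton c (s.length + 1) s [] [] (by omega)]
  simp [hht]

-- every piece of l.splitOn c is an infix of l and does not contain c; the head piece is a prefix
theorem splitOn_pieces (l : List Char) (c : Char) :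
    (∀ p ∈ l.splitOn c, p <:+: l ∧ c ∉ p) ∧
      (∀ h t, l.splitOn c = h :: t → h <+: l) := by
  induction l with
  | nil =>
    constructor
    · intro p hp
      simp [List.splitOn, List.splitOnP_nil] at hp
      subst hp; exact ⟨List.nil_infix, by simp⟩
    · intro h t he
      simp [List.splitOn, List.splitOnP_nil] at he
      simp [← he.1]
  | cons ch rest ih =>
    obtain ⟨h0, t0, hht⟩ : ∃ h0 t0, rest.splitOn c = h0 :: t0 := by
      cases e : rest.splitOn c with
      | nil => exact absurd e (List.splitOnP_ne_nil _ _)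
      | cons a b => exact ⟨a, b, rfl⟩
    by_cases hc : ch = c
    · subst hc
      have hsp : (ch :: rest).splitOn ch = [] :: rest.splitOn ch := by
        simp [List.splitOn, List.splitOnP_cons]
      constructor
      · intro p hp
        rw [hsp] at hp
        rcases List.mem_cons.mp hp with rfl | hp2
        · exact ⟨List.nil_infix, by simp⟩
        · have h2 := ih.1 p hp2
          exact ⟨List.infix_cons h2.1, h2.2⟩
      · intro h t he
        rw [hsp] at he
        cases he
        exact List.nil_prefix
    · have hsp : (ch :: rest).splitOn c = (ch :: h0) :: t0 := by
        have : (ch :: rest).splitOn c = List.modifyHead (List.cons ch) (rest.splitOn c) := by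
          simp [List.splitOn, List.splitOnP_cons, hc]
        rw [this, hht, List.modifyHead_cons]
      have hh0 := ih.1 h0 (by rw [hht]; exact List.mem_cons_self)
      have hh0p : h0 <+: rest := ih.2 h0 t0 hht
      constructor
      · intro p hp
        rw [hsp] at hp
        rcases List.mem_cons.mp hp with rfl | hp2
        · refine ⟨(List.cons_prefix_cons.mpr ⟨rfl, hh0p⟩).isInfix, ?_⟩
          intro hmem
          rcases List.mem_cons.mp hmem with h1 | h1
          · exact hc h1.symm
          · exact hh0.2 h1
        · have h2 := ih.1 p (by rw [hht]; exact List.mem_cons_of_mem _ hp2)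
          exact ⟨List.infix_cons h2.1, h2.2⟩
      · intro h t he
        rw [hsp] at he
        cases he
        exact List.cons_prefix_cons.mpr ⟨rfl, hh0p⟩

theorem singleton_infix_iff (c : Char) (l : List Char) : [c] <:+: l ↔ c ∈ l := by
  constructor
  · rintro ⟨s, t, rfl⟩; simp
  · intro h
    obtain ⟨s, t, rfl⟩ := List.append_of_mem h
    exact ⟨s, t, by simp⟩

theorem split_piece_length_lt (s ele : String)
    (h : ele ∈ (PySem.Str.split? s "@").getD [])
    (hat : PySem.Str.isIn "@" s = true) :
    ele.toList.length < s.toList.length := by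
  have hsep : "@".toList = ['@'] := by decide
  have hsplit : (PySem.Str.split? s "@").getD [] =
      (s.toList.splitOn '@').map String.ofList := by
    simp [PySem.Str.split?, PySem.Chars.split?, hsep, charsSplitOn_singleton]
  rw [hsplit] at h
  obtain ⟨cs, hcs, rfl⟩ := List.mem_map.mp h
  have hp := (splitOn_pieces s.toList '@').1 cs hcs
  have hmem : '@' ∈ s.toList := by
    have := (PySem.Str.isIn_iff_infix "@" s).mp hat
    rw [hsep] at this
    exact (singleton_infix_iff _ _).mp this
  rw [String.toList_ofList]
  have hle := hp.1.length_le
  rcases Nat.lt_or_ge cs.length s.toList.length with h1 | h1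
  · exact h1
  · exfalso
    have heq : cs = s.toList := hp.1.eq_of_length (Nat.le_antisymm hle h1)
    exact hp.2 (heq ▸ hmem)

def deleteCanNameStr (req_str : String) : String :=
  if PySem.Str.isIn "ERROR_MSG" req_str then req_str
  else if req_str == "Strings.toHexString(uint256,uint256).value" then req_str
  else if hat : PySem.Str.isIn "@" req_str = true then
    let eles := (PySem.Str.split? req_str "@").getD []
    let new_req_str := eles.attach.foldl
      (fun acc ele => acc ++ deleteCanNameStr ele.1 ++ "@") ""
    PySem.Str.slice new_req_str none (some (-1))
  else if PySem.Str.isIn "." req_str then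
    -- req_str.split('.') is nonempty, so [-1] never raises; same for '#'/[0]
    let r := (PySem.List.pyGet? ((PySem.Str.split? req_str ".").getD []) (-1)).getD ""
    if PySem.Str.isIn "#" r then
      (PySem.List.pyGet? ((PySem.Str.split? r "#").getD []) 0).getD ""
    else r
  else req_str
termination_by req_str.toList.length
decreasing_by
  exact split_piece_length_lt req_str ele.1 ele.2 hat

-- ===== PORT B =====
-- the special literal of Source B
def pvSpecial : String := "Strings.toHexString(uint256,uint256).value"

-- the end-of-piece emission: ''.join(raw) if ''.join(raw)==_SPECIAL or not seen_dot else ''.join(buf)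
def pvEmit (raw buf : List Char) (sd : Bool) : String :=
  if String.ofList raw == pvSpecial || !sd then String.ofList raw else String.ofList buf

-- one step of the scan; state = (out, raw, buf, seen_dot, hash_seen)
def pvScanStep (st : List String × List Char × List Char × Bool × Bool) (ch : Char) :
    List String × List Char × List Char × Bool × Bool :=
  match st with
  | (out, raw, buf, sd, hs) =>
    if ch = '@' then (out ++ [pvEmit raw buf sd], [], [], false, false)
    else
      let raw' := raw ++ [ch]
      if ch = '.' then (out, raw', [], true, false)
      else if ch = '#' then (out, raw', buf, sd, true)
      else if hs then (out, raw', buf, sd, hs)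
      else (out, raw', buf ++ [ch], sd, hs)

def deleteCanNameStr_alt (req_str : String) : String :=
  if PySem.Str.isIn "ERROR_MSG" req_str then req_str
  else
    let st := req_str.toList.foldl pvScanStep ([], [], [], false, false)
    PySem.Str.join "@" (st.1 ++ [pvEmit st.2.1 st.2.2.1 st.2.2.2.1])

-- ===== PRECONDITION & SPEC =====
def Spec_deleteCanNameStr (req_str : String) (out : String) : Prop := out = deleteCanNameStr_alt req_str
instance (req_str : String) (out : String) : Decidable (Spec_deleteCanNameStr req_str out) := by unfold Spec_deleteCanNameStr; infer_instance

-- ===== CLAIM (what is proved, stated in full; the proofs are below) =====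
def Claim_equal_deleteCanNameStr : Prop := ∀ (req_str : String), Dom_deleteCanNameStr req_str → Spec_deleteCanNameStr req_str (deleteCanNameStr req_str)

-- ===== LEMMAS AND PROOFS =====

-- proof-side description of A's per-piece normalisation
def segNorm (seg : String) : String :=
  if PySem.Str.isIn "ERROR_MSG" seg || seg == pvSpecial then
    seg
  else if PySem.Str.isIn "." seg then
    let r := (PySem.List.pyGet? ((PySem.Str.split? seg ".").getD []) (-1)).getD ""
    if PySem.Str.isIn "#" r then
      (PySem.List.pyGet? ((PySem.Str.split? r "#").getD []) 0).getD ""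
    else r
  else seg

-- the scan's per-piece sub-state (buf, seen_dot, hash_seen) and its step
def pvSegStep (st : List Char × Bool × Bool) (ch : Char) : List Char × Bool × Bool :=
  match st with
  | (buf, sd, hs) =>
    if ch = '.' then ([], true, false)
    else if ch = '#' then (buf, sd, true)
    else if hs then (buf, sd, hs)
    else (buf ++ [ch], sd, hs)

-- the value the scan emits for one fresh '@'-free piece
def pvPieceVal (p : List Char) : String :=
  let st := p.foldl pvSegStep ([], false, false)
  pvEmit p st.1 st.2.1

-- the suffix after the last '.' of a list (the whole list if no '.')
def pvALD : List Char → List Char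
  | [] => []
  | c :: r => if '.' ∈ r then pvALD r else if c = '.' then r else c :: r

theorem pvALD_no_dot (l : List Char) (h : '.' ∉ l) : pvALD l = l := by
  cases l with
  | nil => rfl
  | cons c r =>
    have hr : '.' ∉ r := fun hm => h (List.mem_cons_of_mem _ hm)
    have hc : c ≠ '.' := fun hc => h (hc ▸ List.mem_cons_self)
    simp [pvALD, hr, hc]

theorem not_mem_splitOn (c : Char) (l : List Char) (h : c ∉ l) : l.splitOn c = [l] := by
  induction l with
  | nil => simp [List.splitOn, List.splitOnP_nil]
  | cons a r ih =>
    have ha : a ≠ c := fun e => h (e ▸ List.mem_cons_self)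
    have hr : c ∉ r := fun hm => h (List.mem_cons_of_mem _ hm)
    have : (a :: r).splitOn c = List.modifyHead (List.cons a) (r.splitOn c) := by
      simp [List.splitOn, List.splitOnP_cons, ha]
    rw [this, ih hr, List.modifyHead_cons]

theorem mem_splitOn_two (c : Char) (l : List Char) (h : c ∈ l) :
    2 ≤ (l.splitOn c).length := by
  induction l with
  | nil => simp at h
  | cons a r ih =>
    obtain ⟨h0, t0, hht⟩ : ∃ h0 t0, r.splitOn c = h0 :: t0 := by
      cases e : r.splitOn c with
      | nil => exact absurd e (List.splitOnP_ne_nil _ _)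
      | cons x y => exact ⟨x, y, rfl⟩
    by_cases ha : a = c
    · subst ha
      have : (a :: r).splitOn a = [] :: r.splitOn a := by
        simp [List.splitOn, List.splitOnP_cons]
      rw [this, hht]; simp
    · have : (a :: r).splitOn c = List.modifyHead (List.cons a) (r.splitOn c) := by
        simp [List.splitOn, List.splitOnP_cons, ha]
      rw [this, hht, List.modifyHead_cons]
      have hr : c ∈ r := by
        rcases List.mem_cons.mp h with e | e
        · exact absurd e.symm ha
        · exact e
      have h2 := ih hr
      rw [hht] at h2
      simp at h2 ⊢
      omega

theorem getLast?_splitOn_dot (l : List Char) :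
    (l.splitOn '.').getLast? = some (pvALD l) := by
  induction l with
  | nil => simp [List.splitOn, List.splitOnP_nil, pvALD]
  | cons a r ih =>
    obtain ⟨h0, t0, hht⟩ : ∃ h0 t0, r.splitOn '.' = h0 :: t0 := by
      cases e : r.splitOn '.' with
      | nil => exact absurd e (List.splitOnP_ne_nil _ _)
      | cons x y => exact ⟨x, y, rfl⟩
    by_cases ha : a = '.'
    · subst ha
      have hsp : ('.' :: r).splitOn '.' = [] :: r.splitOn '.' := by
        simp [List.splitOn, List.splitOnP_cons]
      rw [hsp, hht, List.getLast?_cons_cons, ← hht, ih]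
      by_cases hr : '.' ∈ r
      · simp [pvALD, hr]
      · simp [pvALD, hr, pvALD_no_dot r hr]
    · have hsp : (a :: r).splitOn '.' = (a :: h0) :: t0 := by
        have : (a :: r).splitOn '.' = List.modifyHead (List.cons a) (r.splitOn '.') := by
          simp [List.splitOn, List.splitOnP_cons, ha]
        rw [this, hht, List.modifyHead_cons]
      rw [hsp]
      cases t0 with
      | nil =>
        have hr : '.' ∉ r := by
          intro hm
          have := mem_splitOn_two '.' r hm
          rw [hht] at this; simp at this
        rw [not_mem_splitOn _ _ hr] at hht
        cases hht
        simp [pvALD, hr, ha]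
      | cons x y =>
        have hr : '.' ∈ r := by
          by_contra hm
          rw [not_mem_splitOn _ _ hm] at hht
          cases hht
        rw [List.getLast?_cons_cons]
        have h3 : (h0 :: x :: y).getLast? = (x :: y).getLast? := List.getLast?_cons_cons
        rw [← h3, ← hht, ih]
        simp [pvALD, hr]

theorem splitOn_head_takeWhile (c : Char) (l : List Char) :
    (l.splitOn c)[0]? = some (l.takeWhile (· ≠ c)) := by
  induction l with
  | nil => simp [List.splitOn, List.splitOnP_nil]
  | cons a r ih =>
    obtain ⟨h0, t0, hht⟩ : ∃ h0 t0, r.splitOn c = h0 :: t0 := by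
      cases e : r.splitOn c with
      | nil => exact absurd e (List.splitOnP_ne_nil _ _)
      | cons x y => exact ⟨x, y, rfl⟩
    by_cases ha : a = c
    · subst ha
      have hsp : (a :: r).splitOn a = [] :: r.splitOn a := by
        simp [List.splitOn, List.splitOnP_cons]
      rw [hsp]
      simp
    · have hsp : (a :: r).splitOn c = (a :: h0) :: t0 := by
        have : (a :: r).splitOn c = List.modifyHead (List.cons a) (r.splitOn c) := by
          simp [List.splitOn, List.splitOnP_cons, ha]
        rw [this, hht, List.modifyHead_cons]
      rw [hsp]
      rw [hht] at ih
      simp only [List.getElem?_cons_zero, Option.some.injEq] at ih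
      simp [ha, ih]

-- isIn of a one-character needle is list membership
theorem isIn_dot_iff (p : List Char) :
    PySem.Str.isIn "." (String.ofList p) = true ↔ '.' ∈ p := by
  rw [PySem.Str.isIn_iff_infix]
  rw [show (".".toList) = ['.'] from by decide, String.toList_ofList]
  exact singleton_infix_iff _ _

theorem isIn_hash_iff (s : String) :
    PySem.Str.isIn "#" s = true ↔ '#' ∈ s.toList := by
  rw [PySem.Str.isIn_iff_infix]
  rw [show ("#".toList) = ['#'] from by decide]
  exact singleton_infix_iff _ _

-- characterisation of the per-piece sub-state fold
theorem segFold_char (p : List Char) : ∀ (buf : List Char) (sd hs : Bool),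
    p.foldl pvSegStep (buf, sd, hs) =
      if '.' ∈ p then
        ((pvALD p).takeWhile (· ≠ '#'), true, decide ('#' ∈ pvALD p))
      else
        (buf ++ (if hs then [] else p.takeWhile (· ≠ '#')), sd, hs || decide ('#' ∈ p)) := by
  induction p with
  | nil => intro buf sd hs; simp
  | cons c r ih =>
    intro buf sd hs
    by_cases hc : c = '.'
    · subst hc
      rw [List.foldl_cons, show pvSegStep (buf, sd, hs) '.' = ([], true, false) from by simp [pvSegStep], ih]
      by_cases hr : '.' ∈ r
      · simp [hr, pvALD]
      · simp [hr, pvALD, pvALD_no_dot r hr]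
    · by_cases ch : c = '#'
      · subst ch
        rw [List.foldl_cons, show pvSegStep (buf, sd, hs) '#' = (buf, sd, true) from by simp [pvSegStep], ih]
        by_cases hr : '.' ∈ r
        · simp [hr, pvALD, List.mem_cons]
        · have hp : '.' ∉ ('#' :: r) := by simp [hr, Ne.symm hc]
          simp [hr, hp]
      · rw [List.foldl_cons,
          show pvSegStep (buf, sd, hs) c = ((if hs then buf else buf ++ [c]), sd, hs) from by
            by_cases h : hs <;> simp [pvSegStep, hc, ch, h], ih]
        by_cases hr : '.' ∈ r
        · have hp : '.' ∈ (c :: r) := List.mem_cons_of_mem _ hr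
          simp [hr, hp, pvALD]
        · have hp : '.' ∉ (c :: r) := by simp [hr, Ne.symm hc]
          have hh : ('#' ∈ (c :: r)) = ('#' ∈ r) := by simp [List.mem_cons, Ne.symm ch]
          by_cases h : hs
          · simp [hr, hp, h, hh]
          · simp [hr, hp, h, hh, ch]

-- the full scan, characterised over the '@'-split
theorem scan_char : ∀ (l : List Char) (out : List String) (raw buf : List Char) (sd hs : Bool),
    (let st := l.foldl pvScanStep (out, raw, buf, sd, hs)
     st.1 ++ [pvEmit st.2.1 st.2.2.1 st.2.2.2.1]) =
    out ++ (match l.splitOn '@' with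
      | [] => []
      | p :: ps =>
          (let st := p.foldl pvSegStep (buf, sd, hs)
           pvEmit (raw ++ p) st.1 st.2.1)
            :: ps.map (fun q =>
                let st := q.foldl pvSegStep ([], false, false)
                pvEmit q st.1 st.2.1)) := by
  intro l
  induction l with
  | nil =>
    intro out raw buf sd hs
    simp [List.splitOn, List.splitOnP_nil]
  | cons c rest ih =>
    intro out raw buf sd hs
    obtain ⟨h0, t0, hht⟩ : ∃ h0 t0, rest.splitOn '@' = h0 :: t0 := by
      cases e : rest.splitOn '@' with
      | nil => exact absurd e (List.splitOnP_ne_nil _ _)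
      | cons x y => exact ⟨x, y, rfl⟩
    by_cases hc : c = '@'
    · subst hc
      have hsp : ('@' :: rest).splitOn '@' = [] :: rest.splitOn '@' := by
        simp [List.splitOn, List.splitOnP_cons]
      rw [List.foldl_cons,
        show pvScanStep (out, raw, buf, sd, hs) '@' =
          (out ++ [pvEmit raw buf sd], [], [], false, false) from by simp [pvScanStep],
        ih, hsp, hht]
      simp
    · have hsp : (c :: rest).splitOn '@' = (c :: h0) :: t0 := by
        have : (c :: rest).splitOn '@' = List.modifyHead (List.cons c) (rest.splitOn '@') := by
          simp [List.splitOn, List.splitOnP_cons, hc]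
        rw [this, hht, List.modifyHead_cons]
      rw [List.foldl_cons,
        show pvScanStep (out, raw, buf, sd, hs) c =
          (out, raw ++ [c], (pvSegStep (buf, sd, hs) c).1, (pvSegStep (buf, sd, hs) c).2.1,
            (pvSegStep (buf, sd, hs) c).2.2) from by
          by_cases h1 : c = '.' <;> by_cases h2 : c = '#' <;> by_cases h3 : hs <;>
            simp [pvScanStep, pvSegStep, hc, h1, h2, h3],
        ih, hsp, hht]
      simp [List.foldl_cons]

-- on an '@'-free string A takes exactly segNorm's branches
theorem A_eq_segNorm (s : String) (hat : PySem.Str.isIn "@" s = false) :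
    deleteCanNameStr s = segNorm s := by
  rw [deleteCanNameStr, segNorm]
  have hat' : ¬ PySem.Str.isIn "@" s = true := by rw [hat]; decide
  by_cases hE : PySem.Str.isIn "ERROR_MSG" s = true
  · have hg : (PySem.Str.isIn "ERROR_MSG" s || s == pvSpecial) = true := by
      rw [Bool.or_eq_true]; exact Or.inl hE
    rw [if_pos hE, if_pos hg]
  · by_cases hS : (s == "Strings.toHexString(uint256,uint256).value") = true
    · have hg : (PySem.Str.isIn "ERROR_MSG" s || s == pvSpecial) = true := by
        rw [Bool.or_eq_true]; exact Or.inr hS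
      rw [if_neg hE, if_pos hS, if_pos hg]
    · have hg : ¬ (PySem.Str.isIn "ERROR_MSG" s || s == pvSpecial) = true := by
        simp only [Bool.or_eq_true, not_or]; exact ⟨hE, hS⟩
      rw [if_neg hE, if_neg hS, dif_neg hat', if_neg hg]

-- the scan's per-piece value is A's per-piece normalisation (when the piece has no ERROR_MSG)
theorem pieceVal_eq_segNorm (p : List Char)
    (hE : PySem.Str.isIn "ERROR_MSG" (String.ofList p) = false) :
    pvPieceVal p = segNorm (String.ofList p) := by
  unfold pvPieceVal segNorm
  rw [segFold_char]
  have hE' : ¬ PySem.Str.isIn "ERROR_MSG" (String.ofList p) = true := by rw [hE]; decide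
  by_cases hsp : (String.ofList p == pvSpecial) = true
  · have hg : (PySem.Str.isIn "ERROR_MSG" (String.ofList p) || String.ofList p == pvSpecial) = true := by
      rw [Bool.or_eq_true]; exact Or.inr hsp
    by_cases hd : '.' ∈ p <;>
      simp [hd, pvEmit, hsp]
  · have hg : ¬ (PySem.Str.isIn "ERROR_MSG" (String.ofList p) || String.ofList p == pvSpecial) = true := by
      simp only [Bool.or_eq_true, not_or]; exact ⟨hE', fun h => hsp h⟩
    rw [if_neg hg]
    by_cases hd : '.' ∈ p
    · have hdot : PySem.Str.isIn "." (String.ofList p) = true := (isIn_dot_iff p).mpr hd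
      rw [if_pos hdot]
      have hdotsep : (".".toList) = ['.'] := by decide
      have hsplit : (PySem.Str.split? (String.ofList p) ".").getD [] =
          (p.splitOn '.').map String.ofList := by
        simp [PySem.Str.split?, PySem.Chars.split?, hdotsep, charsSplitOn_singleton]
      have hlast : (PySem.List.pyGet? ((PySem.Str.split? (String.ofList p) ".").getD []) (-1)).getD ""
          = String.ofList (pvALD p) := by
        rw [hsplit, PySem.List.pyGet?_neg_one, List.getLast?_map, getLast?_splitOn_dot]
        rfl
      rw [hlast]
      simp only [hd, if_true, pvEmit, hsp, Bool.false_or, Bool.not_true]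
      rw [if_neg (by decide)]
      by_cases hh : '#' ∈ pvALD p
      · have hhash : PySem.Str.isIn "#" (String.ofList (pvALD p)) = true := by
          rw [isIn_hash_iff, String.toList_ofList]; exact hh
        rw [if_pos hhash]
        have hhsep : ("#".toList) = ['#'] := by decide
        have hsplit2 : (PySem.Str.split? (String.ofList (pvALD p)) "#").getD [] =
            ((pvALD p).splitOn '#').map String.ofList := by
          simp [PySem.Str.split?, PySem.Chars.split?, hhsep, charsSplitOn_singleton]
        rw [hsplit2, PySem.List.pyGet?_zero, List.getElem?_map, splitOn_head_takeWhile]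
        rfl
      · have hhash : ¬ PySem.Str.isIn "#" (String.ofList (pvALD p)) = true := by
          rw [isIn_hash_iff, String.toList_ofList]; exact hh
        rw [if_neg hhash]
        have htw : (pvALD p).takeWhile (· ≠ '#') = pvALD p := by
          rw [List.takeWhile_eq_self_iff]
          intro x hx
          simp only [ne_eq, decide_not, Bool.not_eq_true', decide_eq_false_iff_not]
          rintro rfl
          exact hh hx
        rw [htw]
    · have hdot : ¬ PySem.Str.isIn "." (String.ofList p) = true := fun h => hd ((isIn_dot_iff p).mp h)
      rw [if_neg hdot]
      simp [hd, pvEmit]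

-- a piece of the '@'-split of s contains ERROR_MSG only if s does
theorem piece_no_errormsg (s : String) (hE : PySem.Str.isIn "ERROR_MSG" s = false)
    (p : List Char) (hp : p ∈ s.toList.splitOn '@') :
    PySem.Str.isIn "ERROR_MSG" (String.ofList p) = false := by
  by_contra h
  have h' : PySem.Str.isIn "ERROR_MSG" (String.ofList p) = true := by
    cases e : PySem.Str.isIn "ERROR_MSG" (String.ofList p) with
    | false => exact absurd e h
    | true => rfl
  have hinf := (PySem.Str.isIn_iff_infix _ _).mp h'
  simp only [String.toList_ofList] at hinf
  have hps := ((splitOn_pieces s.toList '@').1 p hp).1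
  have : PySem.Str.isIn "ERROR_MSG" s = true :=
    (PySem.Str.isIn_iff_infix _ _).mpr (hinf.trans hps)
  rw [hE] at this; cases this

-- B rewritten over the '@'-split
theorem B_scan (s : String) (hE : PySem.Str.isIn "ERROR_MSG" s = false) :
    deleteCanNameStr_alt s = PySem.Str.join "@" ((s.toList.splitOn '@').map pvPieceVal) := by
  rw [deleteCanNameStr_alt, if_neg (by rw [hE]; decide)]
  have h := scan_char s.toList [] [] [] false false
  obtain ⟨h0, t0, hht⟩ : ∃ h0 t0, s.toList.splitOn '@' = h0 :: t0 := by
    cases e : s.toList.splitOn '@' with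
    | nil => exact absurd e (List.splitOnP_ne_nil _ _)
    | cons x y => exact ⟨x, y, rfl⟩
  rw [hht] at h ⊢
  simp only [List.nil_append] at h
  simp only []
  rw [h]
  have hmap : List.map (fun q =>
        pvEmit q (List.foldl pvSegStep ([], false, false) q).1
          (List.foldl pvSegStep ([], false, false) q).2.1) t0 = List.map pvPieceVal t0 :=
    List.map_congr_left (fun q _ => by simp [pvPieceVal])
  rw [hmap]
  simp [pvPieceVal]

-- A's '@'-branch rewritten over the '@'-split (verbatim the old fold argument)
theorem foldl_attach_A : ∀ (l : List String) (acc : String),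
    (l.attach.foldl (fun acc ele => acc ++ deleteCanNameStr ele.1 ++ "@") acc) =
      l.foldl (fun acc e => acc ++ deleteCanNameStr e ++ "@") acc := by
  intro l
  induction l with
  | nil => intro acc; rfl
  | cons e t ih =>
    intro acc
    simp only [List.attach_cons, List.foldl_cons, List.foldl_map]
    exact ih _

theorem foldl_app (g : String → String) :
    ∀ (l : List String) (acc : String),
      (l.foldl (fun a e => a ++ g e ++ "@") acc).toList =
        acc.toList ++ (l.map (fun e => (g e).toList ++ ['@'])).flatten := by
  intro l
  induction l with
  | nil => intro acc; simp
  | cons e t ih =>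
    intro acc
    have hsep : "@".toList = ['@'] := by decide
    simp [List.foldl_cons, ih, String.toList_append, hsep]

theorem dropLast_flatten_sep (c : Char) :
    ∀ (pieces : List (List Char)), pieces ≠ [] →
      ((pieces.map (fun p => p ++ [c])).flatten).dropLast = PySem.Chars.join [c] pieces := by
  intro pieces
  induction pieces with
  | nil => intro h; exact absurd rfl h
  | cons p t ih =>
    intro _
    cases t with
    | nil => simp [PySem.Chars.join_singleton]
    | cons q u =>
      have hne : ((((q :: u)).map (fun p => p ++ [c])).flatten) ≠ [] := by
        simp
      calc (((p :: q :: u).map (fun p => p ++ [c])).flatten).dropLast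
          = ((p ++ [c]) ++ (((q :: u).map (fun p => p ++ [c])).flatten)).dropLast := by simp
        _ = (p ++ [c]) ++ ((((q :: u).map (fun p => p ++ [c])).flatten)).dropLast := by
              rw [List.dropLast_append_of_ne_nil hne]
        _ = (p ++ [c]) ++ PySem.Chars.join [c] (q :: u) := by rw [ih (by simp)]
        _ = PySem.Chars.join [c] (p :: q :: u) := by
              rw [PySem.Chars.join_cons_cons, List.append_assoc]

theorem A_at (s : String) (hE : ¬ PySem.Str.isIn "ERROR_MSG" s = true)
    (hS : ¬ (s == "Strings.toHexString(uint256,uint256).value") = true)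
    (hat : PySem.Str.isIn "@" s = true) :
    deleteCanNameStr s =
      PySem.Str.join "@" (((s.toList.splitOn '@').map String.ofList).map segNorm) := by
  have hsep : "@".toList = ['@'] := by decide
  have hsplit : (PySem.Str.split? s "@").getD [] =
      (s.toList.splitOn '@').map String.ofList := by
    simp [PySem.Str.split?, PySem.Chars.split?, hsep, charsSplitOn_singleton]
  rw [deleteCanNameStr, if_neg hE, if_neg hS, dif_pos hat]
  rw [← String.toList_inj, PySem.Str.slice_to_neg_one, PySem.Str.toList_join]
  rw [foldl_attach_A, foldl_app deleteCanNameStr]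
  rw [hsplit]
  have hpieces : ∀ cs ∈ s.toList.splitOn '@',
      deleteCanNameStr (String.ofList cs) = segNorm (String.ofList cs) := by
    intro cs hcs
    apply A_eq_segNorm
    have hnm := ((splitOn_pieces s.toList '@').1 cs hcs).2
    rw [← Bool.not_eq_true]
    intro hin
    have := (PySem.Str.isIn_iff_infix "@" (String.ofList cs)).mp hin
    rw [hsep, String.toList_ofList] at this
    exact hnm ((singleton_infix_iff _ _).mp this)
  have hmapped :
      ((s.toList.splitOn '@').map String.ofList).map (fun e => (deleteCanNameStr e).toList ++ ['@'])
        = ((s.toList.splitOn '@').map String.ofList).map (fun e => (segNorm e).toList ++ ['@']) := by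
    apply List.map_congr_left
    intro e he
    obtain ⟨cs, hcs, rfl⟩ := List.mem_map.mp he
    rw [hpieces cs hcs]
  rw [show ("" : String).toList = [] from by decide, List.nil_append, hmapped]
  have hne0 : s.toList.splitOn '@' ≠ [] := by
    simp only [List.splitOn]
    exact List.splitOnP_ne_nil _ _
  have hne : ((s.toList.splitOn '@').map String.ofList).map (fun e => (segNorm e).toList) ≠ [] := by
    simp [hne0]
  have hdl := dropLast_flatten_sep '@'
    (((s.toList.splitOn '@').map String.ofList).map (fun e => (segNorm e).toList)) hne
  simp only [List.map_map, Function.comp_def] at hdl ⊢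
  rw [hsep]
  exact hdl

theorem main_eq (s : String) : deleteCanNameStr s = deleteCanNameStr_alt s := by
  by_cases hE : PySem.Str.isIn "ERROR_MSG" s = true
  · rw [deleteCanNameStr, if_pos hE, deleteCanNameStr_alt, if_pos hE]
  · have hE' : PySem.Str.isIn "ERROR_MSG" s = false := by
      cases e : PySem.Str.isIn "ERROR_MSG" s with
      | false => rfl
      | true => exact absurd e hE
    have hBmaps : (s.toList.splitOn '@').map pvPieceVal =
        ((s.toList.splitOn '@').map String.ofList).map segNorm := by
      rw [List.map_map]
      apply List.map_congr_left
      intro p hp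
      exact pieceVal_eq_segNorm p (piece_no_errormsg s hE' p hp)
    by_cases hat : PySem.Str.isIn "@" s = true
    · have hS : ¬ (s == "Strings.toHexString(uint256,uint256).value") = true := by
        intro h
        have hs' : s = "Strings.toHexString(uint256,uint256).value" := by
          exact eq_of_beq h
        rw [hs'] at hat
        exact absurd hat (by decide)
      rw [A_at s hE hS hat, B_scan s hE', hBmaps]
    · have hat' : PySem.Str.isIn "@" s = false := by
        cases e : PySem.Str.isIn "@" s with
        | false => rfl
        | true => exact absurd e hat
      have hnm : '@' ∉ s.toList := by
        intro hm
        have : PySem.Str.isIn "@" s = true := by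
          rw [PySem.Str.isIn_iff_infix, show ("@".toList) = ['@'] from by decide]
          exact (singleton_infix_iff _ _).mpr hm
        rw [hat'] at this; cases this
      rw [A_eq_segNorm s hat', B_scan s hE', not_mem_splitOn '@' s.toList hnm]
      simp only [List.map_cons, List.map_nil]
      rw [pieceVal_eq_segNorm s.toList (by rw [String.ofList_toList]; exact hE'),
        String.ofList_toList]
      rw [← String.toList_inj, PySem.Str.toList_join]
      simp [PySem.Chars.join_singleton]

-- ===== VERDICT (by name: the statement is the Claim_ definition above) =====
theorem deleteCanNameStr_spec : Claim_equal_deleteCanNameStr := by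
  intro s _
  unfold Spec_deleteCanNameStr
  exact main_eq s
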